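-- pv_equiv track=rewrite | github.com/Master110xd/Prueba-Final | Funciones.py | verificarEntrada
-- ===== SOURCE A (Python) =====
-- def verificarEntrada(arreglo, num_entrada):
--     x = 1
--     for f in range(10):
--         for c in range(10):
--             if x == num_entrada:
--                 arreglo[f][c] = 'XX'
--                 return True
--             x = x + 1
--     return False
-- ===== SOURCE B (Python) =====
-- def verificarEntrada(arreglo, num_entrada):
--     # Direct arithmetic instead of the 10x10 counting scan.
--     if 1 <= num_entrada <= 100:
--         i = int(num_entrada) - 1
--         arreglo[i // 10][i % 10] = 'XX'
--         return True
--     return False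
-- ===== Notes on version B (the rewrite author's own statement) =====
-- stated objective: simpler
-- what changed: Replaces the 10x10 counting scan with a closed-form range check and direct index arithmetic (i//10, i%10); no loop remains.
-- outside the precondition, e.g. on verificarEntrada([], 5): A raises IndexError, B raises IndexError
import Mathlib
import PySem

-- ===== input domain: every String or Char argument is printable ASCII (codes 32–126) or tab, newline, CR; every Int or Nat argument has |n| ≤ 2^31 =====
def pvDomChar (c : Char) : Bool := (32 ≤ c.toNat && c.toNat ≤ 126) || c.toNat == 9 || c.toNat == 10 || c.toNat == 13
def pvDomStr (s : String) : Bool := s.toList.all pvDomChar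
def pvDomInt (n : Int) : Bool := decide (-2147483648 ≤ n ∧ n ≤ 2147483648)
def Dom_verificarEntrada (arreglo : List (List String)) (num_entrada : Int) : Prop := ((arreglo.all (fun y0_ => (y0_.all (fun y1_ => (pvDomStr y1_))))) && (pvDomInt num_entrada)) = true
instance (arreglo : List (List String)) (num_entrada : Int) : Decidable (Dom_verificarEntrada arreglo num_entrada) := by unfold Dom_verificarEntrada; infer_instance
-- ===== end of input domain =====

-- B replaces the 10x10 counting scan by a closed-form range check and direct index
-- arithmetic (simpler). Both A and B mutate arreglo in place (setting the same cell to
-- 'XX'); the equivalence proved here is about the RETURN value only.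

-- ===== PORT A =====
-- state: (early-return value if any, the counter x); one step of the inner `for c` loop
def pvStepA (num_entrada : Int) (st : Option Bool × Int) (_c : Int) : Option Bool × Int :=
  match st with
  | (some b, x) => (some b, x)   -- already returned
  | (none, x) => if x == num_entrada then (some true, x) else (none, x + 1)

def verificarEntrada (_arreglo : List (List String)) (num_entrada : Int) : Bool :=
  -- x = 1; for f in range(10): for c in range(10): if x == num_entrada: return True; x += 1
  -- (the assignment arreglo[f][c] = 'XX' is a mutation, not part of the return value;
  --  Pre_ excludes the inputs on which that assignment raises IndexError)
  (((PySem.List.pyRange 0 10 1).foldl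
      (fun st _f => (PySem.List.pyRange 0 10 1).foldl (pvStepA num_entrada) st)
      ((none : Option Bool), (1 : Int))).1).getD false

-- ===== PORT B =====
def verificarEntrada_alt (_arreglo : List (List String)) (num_entrada : Int) : Bool :=
  if 1 ≤ num_entrada ∧ num_entrada ≤ 100 then true else false

-- ===== PRECONDITION & SPEC =====
-- Pre_ excludes exactly the inputs on which the Python A raises IndexError: num_entrada in
-- 1..100 but the grid lacks the cell arreglo[(num-1)//10][(num-1)%10] (B raises there too).
def Pre_verificarEntrada (arreglo : List (List String)) (num_entrada : Int) : Prop :=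
  (1 ≤ num_entrada ∧ num_entrada ≤ 100) →
    ((num_entrada - 1).toNat / 10 < arreglo.length ∧
     (num_entrada - 1).toNat % 10 < (arreglo.getD ((num_entrada - 1).toNat / 10) []).length)
instance (arreglo : List (List String)) (num_entrada : Int) : Decidable (Pre_verificarEntrada arreglo num_entrada) := by unfold Pre_verificarEntrada; infer_instance

def pvWitness_verificarEntrada : List (List String) × Int := ([["a"]], 1)

def Spec_verificarEntrada (arreglo : List (List String)) (num_entrada : Int) (out : Bool) : Prop := out = verificarEntrada_alt arreglo num_entrada
instance (arreglo : List (List String)) (num_entrada : Int) (out : Bool) : Decidable (Spec_verificarEntrada arreglo num_entrada out) := by unfold Spec_verificarEntrada; infer_instance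

-- ===== CLAIM (what is proved, stated in full; the proofs are below) =====
def Claim_equal_verificarEntrada : Prop := ∀ (arreglo : List (List String)) (num_entrada : Int), Dom_verificarEntrada arreglo num_entrada → Pre_verificarEntrada arreglo num_entrada → Spec_verificarEntrada arreglo num_entrada (verificarEntrada arreglo num_entrada)

-- ===== LEMMAS AND PROOFS =====
-- once the scan has matched, further steps change nothing
theorem pvStepA_frozen (n : Int) (l : List Int) (b : Bool) (x : Int) :
    l.foldl (pvStepA n) (some b, x) = (some b, x) := by
  induction l with
  | nil => rfl
  | cons a t ih => simpa [pvStepA] using ih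

-- the inner scan from counter x over a list of length k matches iff x ≤ n < x + k
theorem pvStepA_scan (n : Int) (l : List Int) (x : Int) :
    l.foldl (pvStepA n) (none, x) =
      if x ≤ n ∧ n < x + l.length then (some true, n) else (none, x + l.length) := by
  induction l generalizing x with
  | nil => simp
  | cons a t ih =>
    simp only [List.foldl_cons, pvStepA, List.length_cons]
    by_cases h : x = n
    · subst h
      rw [if_pos (beq_self_eq_true x), pvStepA_frozen,
        if_pos (by constructor <;> push_cast <;> omega)]
    · rw [if_neg (by simpa using h), ih (x + 1)]
      by_cases h2 : x + 1 ≤ n ∧ n < x + 1 + t.length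
      · rw [if_pos h2, if_pos (by push_cast at h2 ⊢; omega)]
      · rw [if_neg h2, if_neg (by push_cast at h2 ⊢; omega)]
        simp; ring

-- the outer fold changes nothing once the scan has matched
theorem pvRows_frozen (n : Int) (l : List Int) (b : Bool) (x : Int) :
    l.foldl (fun st _f => (PySem.List.pyRange 0 10 1).foldl (pvStepA n) st) (some b, x) = (some b, x) := by
  induction l with
  | nil => rfl
  | cons a t ih => simpa [pvStepA_frozen] using ih

-- the outer scan over r rows of 10 columns matches iff x ≤ n < x + 10*r
theorem pvStepA_rows (n : Int) (l : List Int) (x : Int) :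
    l.foldl (fun st _f => (PySem.List.pyRange 0 10 1).foldl (pvStepA n) st) (none, x) =
      if x ≤ n ∧ n < x + 10 * l.length then (some true, n)
      else (none, x + 10 * l.length) := by
  induction l generalizing x with
  | nil => simp
  | cons a t ih =>
    simp only [List.foldl_cons]
    rw [pvStepA_scan,
      show (((PySem.List.pyRange 0 10 1).length : Nat) : Int) = 10 from by decide]
    by_cases h : x ≤ n ∧ n < x + 10
    · rw [if_pos h, pvRows_frozen,
        if_pos (by simp only [List.length_cons]; constructor <;> push_cast <;> omega)]
    · rw [if_neg h, ih (x + 10)]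
      by_cases h2 : x + 10 ≤ n ∧ n < x + 10 + 10 * t.length
      · rw [if_pos h2, if_pos (by simp only [List.length_cons]; push_cast at h2 ⊢; omega)]
      · rw [if_neg h2, if_neg (by simp only [List.length_cons]; push_cast at h2 ⊢; omega)]
        simp only [List.length_cons]; simp; ring

-- ===== VERDICT (by name: the statement is the Claim_ definition above) =====
theorem verificarEntrada_spec : Claim_equal_verificarEntrada := by
  intro arreglo n _ _
  unfold Spec_verificarEntrada verificarEntrada verificarEntrada_alt
  rw [pvStepA_rows]
  rw [show ((PySem.List.pyRange 0 10 1).length : Nat) = 10 from by decide]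
  by_cases h : 1 ≤ n ∧ n ≤ 100
  · rw [if_pos (by omega), if_pos h]; rfl
  · rw [if_neg (by omega), if_neg h]; rfl
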